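-- pv_equiv track=rewrite | github.com/sana-doganus/stepanova_labs | lab2.py | matrix
-- ===== SOURCE A (Python) =====
-- def matrix(num):  # задача 8 - квадратная матрица из сумм элементов соседей
--     mat = [[0 for i in range(num)] for j in range(num)]  # генерация двумерного нулевого массива
--     for i in range(len(mat)):
--         for j in range(len(mat[i])):
--             if i == 0 or j == 0:  # если первый ряд или строка, элемент равен единице
--                 mat[i][j] = 1
--             else:  # иначе равен сумме элемента выше и элемента слева
--                 mat[i][j] = mat[i - 1][j] + mat[i][j - 1]
--     return mat
-- ===== SOURCE B (Python) =====
-- def matrix(num):  # each row built independently by the multiplicative binomial formula: cell (i,j) = C(i+j, i)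
--     res = []
--     for i in range(num):
--         row = []
--         c = 1
--         for j in range(num):
--             row.append(c)
--             c = c * (i + j + 1) // (j + 1)  # exact: c == C(i+j, i) before, C(i+j+1, i) after
--         res.append(row)
--     return res
-- ===== Notes on version B (the rewrite author's own statement) =====
-- stated objective: alternative
-- what changed: Replaces the zero-filled n×n table with the neighbor-sum recurrence (reads of the cell above and to the left) by computing each row independently with the running multiplicative binomial formula c -> c*(i+j+1)//(j+1), so cell (i,j) = C(i+j,i) and no previous row is kept.
import Mathlib
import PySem

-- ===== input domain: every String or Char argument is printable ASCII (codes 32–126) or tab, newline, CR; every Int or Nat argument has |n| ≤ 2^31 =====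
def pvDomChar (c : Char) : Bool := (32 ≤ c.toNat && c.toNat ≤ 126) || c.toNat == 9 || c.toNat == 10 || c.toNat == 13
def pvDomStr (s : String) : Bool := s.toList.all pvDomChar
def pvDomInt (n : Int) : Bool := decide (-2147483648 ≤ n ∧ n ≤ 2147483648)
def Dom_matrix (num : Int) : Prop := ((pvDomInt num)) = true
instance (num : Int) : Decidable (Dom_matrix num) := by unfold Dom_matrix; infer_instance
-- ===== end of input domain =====

-- B builds each row independently with the running multiplicative binomial formula c -> c*(i+j+1)//(j+1)
-- instead of A's zero table updated by the neighbor-sum recurrence (objective: alternative algorithm).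


-- ===== PORT A =====
-- one body-step of Python's inner loop: 'mat[i][j] = …'
def matrixInner (i : Int) (mat : List (List Int)) (j : Int) : List (List Int) :=
  if i == 0 || j == 0 then
    PySem.List.pySetD mat i (PySem.List.pySetD (PySem.List.pyGetD mat i []) j 1)
  else
    PySem.List.pySetD mat i (PySem.List.pySetD (PySem.List.pyGetD mat i []) j
      (PySem.List.pyGetD (PySem.List.pyGetD mat (i - 1) []) j 0 +
       PySem.List.pyGetD (PySem.List.pyGetD mat i []) (j - 1) 0))

-- one outer-loop step: 'for j in range(len(mat[i])): …'
def matrixOuter (mat : List (List Int)) (i : Int) : List (List Int) :=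
  (PySem.List.pyRange 0 (PySem.List.len (PySem.List.pyGetD mat i [])) 1).foldl (matrixInner i) mat

def matrix (num : Int) : List (List Int) :=
  let mat := (PySem.List.pyRange 0 num 1).map
    (fun _ => (PySem.List.pyRange 0 num 1).map (fun _ => (0 : Int)))
  (PySem.List.pyRange 0 (PySem.List.len mat) 1).foldl matrixOuter mat

-- ===== PORT B =====
def matrix_alt (num : Int) : List (List Int) :=
  (PySem.List.pyRange 0 num 1).foldl (fun res i =>
    let p := (PySem.List.pyRange 0 num 1).foldl
      (fun (p : List Int × Int) j =>
        (p.1 ++ [p.2], PySem.Int.floordiv (p.2 * (i + j + 1)) (j + 1)))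
      ([], 1)
    res ++ [p.1]) []

-- ===== PRECONDITION & SPEC =====
def Spec_matrix (num : Int) (out : List (List Int)) : Prop := out = matrix_alt num
instance (num : Int) (out : List (List Int)) : Decidable (Spec_matrix num out) := by unfold Spec_matrix; infer_instance

-- ===== CLAIM (what is proved, stated in full; the proofs are below) =====
def Claim_equal_matrix : Prop := ∀ (num : Int), Dom_matrix num → Spec_matrix num (matrix num)

-- ===== LEMMAS AND PROOFS =====
-- the common value of both programs: row i, column j holds C(i+j, i)
def trow (n i : Nat) : List Int := (List.range n).map (fun j => (((i + j).choose i : Nat) : Int))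

def M (n k : Nat) : List (List Int) :=
  (List.range n).map (fun r => if r < k then trow n r else List.replicate n (0 : Int))

def P (n k j : Nat) : List Int :=
  (List.range n).map (fun t => if t < j then (((k + t).choose k : Nat) : Int) else 0)

theorem getD_map_range' {α : Type} (n k : Nat) (f : Nat → α) (d : α) (h : k < n) :
    ((List.range n).map f).getD k d = f k := by
  rw [List.getD_eq_getElem?_getD]
  simp [h]

theorem set_map_range {α : Type} (n j : Nat) (f : Nat → α) (v : α) :
    ((List.range n).map f).set j v = (List.range n).map (fun t => if t = j then v else f t) := by
  apply List.ext_getElem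
  · simp
  · intro t h1 h2
    simp only [List.getElem_set, List.getElem_map, List.getElem_range]
    rcases eq_or_ne t j with h | h
    · subst h; simp
    · rw [if_neg (fun hh => h hh.symm), if_neg h]

theorem P_succ (n k j : Nat) :
    (P n k j).set j (((k + j).choose k : Nat) : Int) = P n k (j + 1) := by
  rw [P, P, set_map_range]
  apply List.map_congr_left
  intro t _
  by_cases h : t = j
  · subst h; simp
  · simp only [if_neg h]
    have : t < j ↔ t < j + 1 := by omega
    simp [this]

theorem M_row (n k r : Nat) (hr : r < n) :
    (M n k).getD r [] = if r < k then trow n r else List.replicate n (0 : Int) := by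
  rw [M, getD_map_range' n r _ _ hr]

theorem Mset_row (n k j r : Nat) (hr : r < n) (hne : r ≠ k) :
    ((M n k).set k (P n k j)).getD r [] = (M n k).getD r [] := by
  rw [List.getD_eq_getElem?_getD, List.getElem?_set_ne (by omega), ← List.getD_eq_getElem?_getD]

theorem Mset_selfrow (n k j : Nat) (hk : k < n) :
    ((M n k).set k (P n k j)).getD k [] = P n k j := by
  have hlen : k < (M n k).length := by simp [M]; omega
  rw [List.getD_eq_getElem?_getD, List.getElem?_set_self hlen]
  rfl

theorem choose_step (k j : Nat) (hk : 1 ≤ k) (hj : 1 ≤ j) :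
    (((k - 1 + j).choose (k - 1) : Nat) : Int) + (((k + (j - 1)).choose k : Nat) : Int)
      = (((k + j).choose k : Nat) : Int) := by
  obtain ⟨a, rfl⟩ : ∃ a, k = a + 1 := ⟨k - 1, by omega⟩
  obtain ⟨b, rfl⟩ : ∃ b, j = b + 1 := ⟨j - 1, by omega⟩
  rw [← Nat.cast_add]
  congr 1
  rw [show a + 1 - 1 + (b + 1) = a + b + 1 by omega, show a + 1 - 1 = a by omega,
      show a + 1 + (b + 1 - 1) = a + b + 1 by omega, show a + 1 + (b + 1) = a + b + 1 + 1 by omega]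
  exact (Nat.choose_succ_succ (a + b + 1) a).symm

theorem P_getD (n k j t : Nat) (ht : t < n) :
    (P n k j).getD t 0 = if t < j then (((k + t).choose k : Nat) : Int) else 0 := by
  rw [P, getD_map_range' n t _ _ ht]

theorem trow_getD (n i t : Nat) (ht : t < n) :
    (trow n i).getD t 0 = (((i + t).choose i : Nat) : Int) := by
  rw [trow, getD_map_range' n t _ _ ht]

theorem A_inner_step (n k j : Nat) (hk : k < n) (hj : j < n) :
    matrixInner (k : Int) ((M n k).set k (P n k j)) (j : Int)
      = (M n k).set k (P n k (j + 1)) := by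
  have hgetk : PySem.List.pyGetD ((M n k).set k (P n k j)) (k : Int) [] = P n k j := by
    rw [PySem.List.pyGetD_natCast, Mset_selfrow n k j hk]
  by_cases h : k = 0 ∨ j = 0
  · have hcond : (((k : Int) == 0) || ((j : Int) == 0)) = true := by
      rcases h with h | h <;> subst h <;> simp
    have hone : (1 : Int) = (((k + j).choose k : Nat) : Int) := by
      rcases h with h | h <;> subst h <;> simp
    rw [matrixInner, hcond, if_pos rfl, hgetk,
        PySem.List.pySetD_natCast, PySem.List.pySetD_natCast, hone, P_succ, List.set_set]
  · push_neg at h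
    obtain ⟨hk1, hj1⟩ := h
    have hcond : (((k : Int) == 0) || ((j : Int) == 0)) = false := by
      simp; omega
    rw [matrixInner, hcond]
    simp only [Bool.false_eq_true, if_false, hgetk]
    have hsub : (k : Int) - 1 = ((k - 1 : Nat) : Int) := by omega
    have hsubj : (j : Int) - 1 = ((j - 1 : Nat) : Int) := by omega
    rw [hsub, hsubj, PySem.List.pyGetD_natCast, PySem.List.pyGetD_natCast,
        PySem.List.pyGetD_natCast]
    rw [Mset_row n k j (k - 1) (by omega) (by omega), M_row n k (k - 1) (by omega),
        if_pos (by omega)]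
    rw [trow_getD n (k - 1) j hj]
    rw [P_getD n k j (j - 1) (by omega), if_pos (by omega)]
    rw [choose_step k j (by omega) (by omega)]
    rw [PySem.List.pySetD_natCast, PySem.List.pySetD_natCast, P_succ, List.set_set]

theorem P_zero (n k : Nat) : P n k 0 = List.replicate n (0 : Int) := by
  simp [P, List.map_const']

theorem Mset_zero (n k : Nat) (hk : k < n) : (M n k).set k (P n k 0) = M n k := by
  rw [P_zero]
  apply List.ext_getElem
  · simp
  · intro t h1 h2
    rw [List.getElem_set]
    split_ifs with h
    · subst h; simp [M, hk]
    · rfl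

theorem Mset_full (n k : Nat) (hk : k < n) : (M n k).set k (P n k n) = M n (k + 1) := by
  apply List.ext_getElem
  · simp [M]
  · intro t h1 h2
    rw [List.getElem_set]
    have ht : t < n := by simpa [M] using h2
    split_ifs with h
    · subst h
      simp only [M, List.getElem_map, List.getElem_range, if_pos (by omega : k < k + 1)]
      rw [P, trow]
      apply List.map_congr_left
      intro x hx
      rw [if_pos (List.mem_range.mp hx)]
    · simp only [M, List.getElem_map, List.getElem_range]
      have : t < k ↔ t < k + 1 := by omega
      simp [this]

theorem A_inner (n k : Nat) (hk : k < n) : ∀ (cnt j : Nat), j + cnt ≤ n →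
    ((List.range' j cnt).map (fun (t : Nat) => (t : Int))).foldl (matrixInner (k : Int))
        ((M n k).set k (P n k j))
      = (M n k).set k (P n k (j + cnt)) := by
  intro cnt
  induction cnt with
  | zero => intro j _; simp
  | succ c ih =>
    intro j hle
    rw [List.range'_succ]
    simp only [List.map_cons, List.foldl_cons]
    rw [A_inner_step n k j hk (by omega), ih (j + 1) (by omega),
        show j + 1 + c = j + (c + 1) by omega]

theorem pyRange_natCast (n : Nat) :
    PySem.List.pyRange 0 (n : Int) 1 = (List.range n).map (fun (k : Nat) => (k : Int)) := by
  rw [PySem.List.pyRange_one]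
  simp [← List.map_eq_flatMap]

theorem A_outer_step (n k : Nat) (hk : k < n) :
    matrixOuter (M n k) (k : Int) = M n (k + 1) := by
  rw [matrixOuter, PySem.List.pyGetD_natCast, M_row n k k hk, if_neg (by omega)]
  have hlen : PySem.List.len (List.replicate n (0 : Int)) = (n : Int) := by
    simp [PySem.List.len_eq]
  rw [hlen, pyRange_natCast, List.range_eq_range', ← Mset_zero n k hk,
      A_inner n k hk n 0 (by omega), Nat.zero_add, Mset_full n k hk]

theorem A_outer (n : Nat) : ∀ (cnt k : Nat), k + cnt ≤ n →
    ((List.range' k cnt).map (fun (t : Nat) => (t : Int))).foldl matrixOuter (M n k)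
      = M n (k + cnt) := by
  intro cnt
  induction cnt with
  | zero => intro k _; simp
  | succ c ih =>
    intro k hle
    rw [List.range'_succ]
    simp only [List.map_cons, List.foldl_cons]
    rw [A_outer_step n k (by omega), ih (k + 1) (by omega),
        show k + 1 + c = k + (c + 1) by omega]

theorem pyRange_nat (num : Int) :
    PySem.List.pyRange 0 num 1 = (List.range num.toNat).map (fun (k : Nat) => (k : Int)) := by
  rw [PySem.List.pyRange_one]
  simp [← List.map_eq_flatMap]

theorem M_zero (n : Nat) :
    ((List.range n).map (fun (k : Nat) => (k : Int))).map
      (fun _ => ((List.range n).map (fun (k : Nat) => (k : Int))).map (fun _ => (0 : Int)))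
    = M n 0 := by
  simp [M, List.map_map, Function.comp_def, List.map_const']

theorem M_full (n : Nat) : M n n = (List.range n).map (trow n) := by
  rw [M]
  apply List.map_congr_left
  intro r hr
  rw [if_pos (List.mem_range.mp hr)]

theorem A_eq (num : Int) : matrix num = (List.range num.toNat).map (trow num.toNat) := by
  rw [matrix]
  simp only [pyRange_nat, M_zero]
  have hlen : PySem.List.len (M num.toNat 0) = ((num.toNat : Nat) : Int) := by
    simp [PySem.List.len_eq, M]
  rw [hlen]
  simp only [Int.toNat_natCast]
  rw [List.range_eq_range', A_outer num.toNat num.toNat 0 (by omega), Nat.zero_add, M_full,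
      List.range_eq_range']

theorem B_row (i : Nat) : ∀ (cnt j : Nat) (acc : List Int),
    ((List.range' j cnt).map (fun (k : Nat) => (k : Int))).foldl
      (fun (p : List Int × Int) jj =>
        (p.1 ++ [p.2], PySem.Int.floordiv (p.2 * ((i : Int) + jj + 1)) (jj + 1)))
      (acc, (((i + j).choose i : Nat) : Int))
    = (acc ++ (List.range' j cnt).map (fun (t : Nat) => (((i + t).choose i : Nat) : Int)),
       (((i + j + cnt).choose i : Nat) : Int)) := by
  intro cnt
  induction cnt with
  | zero => intro j acc; simp
  | succ c ih =>
    intro j acc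
    rw [List.range'_succ]
    simp only [List.map_cons, List.foldl_cons]
    have hc : PySem.Int.floordiv ((((i + j).choose i : Nat) : Int) * ((i : Int) + (j : Int) + 1)) ((j : Int) + 1)
        = (((i + (j + 1)).choose i : Nat) : Int) := by
      have h1 : (((i + j).choose i : Nat) : Int) * ((i : Int) + (j : Int) + 1)
          = (((i + j).choose i * (i + j + 1) : Nat) : Int) := by push_cast; ring
      have h2 : ((j : Int) + 1) = (((j + 1 : Nat)) : Int) := by push_cast; ring
      rw [h1, h2, PySem.Int.floordiv_natCast]
      congr 1
      have key : (i + j).choose i * (i + j + 1) = (i + j + 1).choose (j + 1) * (j + 1) := by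
        have h3 := Nat.succ_mul_choose_eq (i + j) j
        have h4 : (i + j).choose j = (i + j).choose i := by
          rw [← Nat.choose_symm (by omega : j ≤ i + j)]
          congr 1
          omega
        rw [h4] at h3
        calc (i + j).choose i * (i + j + 1)
            = (i + j).succ * (i + j).choose i := by rw [Nat.succ_eq_add_one]; ring
          _ = (i + j).succ.choose j.succ * j.succ := h3
          _ = (i + j + 1).choose (j + 1) * (j + 1) := rfl
      rw [key, Nat.mul_div_cancel _ (by omega)]
      rw [← Nat.choose_symm (by omega : (j + 1) ≤ i + j + 1)]
      congr 1
      omega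
    rw [hc]
    have h5 := ih (j + 1) (acc ++ [(((i + j).choose i : Nat) : Int)])
    rw [show i + (j + 1) + c = i + j + (c + 1) by omega] at h5
    rw [h5]
    simp

theorem B_row_full (n i : Nat) :
    (((List.range n).map (fun (k : Nat) => (k : Int))).foldl
      (fun (p : List Int × Int) j =>
        (p.1 ++ [p.2], PySem.Int.floordiv (p.2 * ((i : Int) + j + 1)) (j + 1)))
      ([], 1)).1 = trow n i := by
  have h := B_row i n 0 []
  simp only [Nat.add_zero, Nat.choose_self, Nat.cast_one] at h
  rw [List.range_eq_range', h, trow, List.range_eq_range']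
  rfl

theorem B_eq (num : Int) : matrix_alt num = (List.range num.toNat).map (trow num.toNat) := by
  rw [matrix_alt]
  simp only [pyRange_nat]
  rw [PySem.List.foldl_append_singleton_eq_map, List.nil_append, List.map_map]
  apply List.map_congr_left
  intro i _
  exact B_row_full num.toNat i

-- ===== VERDICT (by name: the statement is the Claim_ definition above) =====
theorem matrix_spec : Claim_equal_matrix := by
  intro num _
  unfold Spec_matrix
  rw [A_eq, B_eq]
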